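-- pv_equiv track=rewrite | github.com/zclyne/LeetCode-Problems | Algorithm_747_Largest Number At Least Twice of Others.py | dominantIndex
-- ===== SOURCE A (Python) =====
-- def dominantIndex(nums):
--     """
--     :type nums: List[int]
--     :rtype: int
--     """
--     max_index=0
--     for i in range(1,len(nums)):
--         if nums[i]>nums[max_index]:
--             max_index=i
--     for i in range(len(nums)):
--         if i==max_index: continue
--         if nums[max_index]<2*nums[i]: return -1
--     return max_index
-- ===== SOURCE B (Python) =====
-- def dominantIndex(nums):
--     if not nums:
--         return 0
--     max_v, max_i, second = nums[0], 0, None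
--     for i in range(1, len(nums)):
--         x = nums[i]
--         if x > max_v:
--             second = max_v
--             max_v, max_i = x, i
--         elif second is None or x > second:
--             second = x
--     if second is None or max_v >= 2 * second:
--         return max_i
--     return -1
-- ===== Notes on version B (the rewrite author's own statement) =====
-- stated objective: alternative
-- what changed: replaces A's two passes (argmax scan, then a full re-scan checking 2*nums[i]) by a single pass that maintains max value, its first index, and the max of all other elements, deciding with one final comparison
import Mathlib
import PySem

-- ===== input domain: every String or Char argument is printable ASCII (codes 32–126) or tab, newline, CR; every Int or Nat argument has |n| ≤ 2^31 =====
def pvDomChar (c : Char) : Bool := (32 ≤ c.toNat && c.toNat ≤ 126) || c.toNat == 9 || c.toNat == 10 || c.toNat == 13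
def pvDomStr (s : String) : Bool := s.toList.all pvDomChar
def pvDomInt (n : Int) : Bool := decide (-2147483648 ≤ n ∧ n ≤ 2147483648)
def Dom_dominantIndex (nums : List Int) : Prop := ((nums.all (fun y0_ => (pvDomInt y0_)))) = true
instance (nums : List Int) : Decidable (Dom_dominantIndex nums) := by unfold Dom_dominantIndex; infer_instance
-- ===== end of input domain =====

-- B replaces A's two passes over nums by a single pass tracking (max value, its first index, max of the other elements); same O(n) cost, different decomposition.

-- ===== PORT A =====
-- first loop of A: for i in range(1, len(nums)): if nums[i] > nums[max_index]: max_index = i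
-- (every index reaching nums[...] is in range, so the total pyGetD with default 0 is exact here)
def aMaxLoop (nums : List Int) : Int :=
  (PySem.List.pyRange 1 (PySem.List.len nums) 1).foldl
    (fun mi i => if PySem.List.pyGetD nums i 0 > PySem.List.pyGetD nums mi 0 then i else mi) 0

-- second loop of A, with its early 'return -1'
def aCheck (nums : List Int) (mi : Int) : List Int → Int
  | [] => mi
  | i :: rest =>
    if i = mi then aCheck nums mi rest
    else if PySem.List.pyGetD nums mi 0 < 2 * PySem.List.pyGetD nums i 0 then -1
    else aCheck nums mi rest

def dominantIndex (nums : List Int) : Int :=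
  aCheck nums (aMaxLoop nums) (PySem.List.pyRange 0 (PySem.List.len nums) 1)

-- ===== PORT B =====
-- B's single loop: state (max_v, max_i, second), scanning nums[1:] with index i
def altLoop : List Int → Int → Int → Int → Option Int → Int × Int × Option Int
  | [], _, mv, mi, sec => (mv, mi, sec)
  | x :: rest, i, mv, mi, sec =>
    if x > mv then altLoop rest (i + 1) x i (some mv)
    else
      match sec with
      | none => altLoop rest (i + 1) mv mi (some x)
      | some s => if x > s then altLoop rest (i + 1) mv mi (some x)
                  else altLoop rest (i + 1) mv mi (some s)

def dominantIndex_alt (nums : List Int) : Int :=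
  match nums with
  | [] => 0
  | x :: rest =>
    match altLoop rest 1 x 0 none with
    | (_, mi, none) => mi
    | (mv, mi, some s) => if mv ≥ 2 * s then mi else -1

-- ===== PRECONDITION & SPEC =====
def Spec_dominantIndex (nums : List Int) (out : Int) : Prop := out = dominantIndex_alt nums
instance (nums : List Int) (out : Int) : Decidable (Spec_dominantIndex nums out) := by unfold Spec_dominantIndex; infer_instance

-- ===== CLAIM (what is proved, stated in full; the proofs are below) =====
def Claim_equal_dominantIndex : Prop := ∀ (nums : List Int), Dom_dominantIndex nums → Spec_dominantIndex nums (dominantIndex nums)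

-- ===== LEMMAS AND PROOFS =====

-- what B's 'second' value means after scanning indices [0, i): none ↔ every scanned index is mi,
-- some s ↔ s is attained at a scanned index ≠ mi and bounds every scanned index ≠ mi
def SecInv (nums : List Int) (i mi : Int) : Option Int → Prop
  | none => ∀ j : Int, 0 ≤ j → j < i → j = mi
  | some s => (∃ j : Int, 0 ≤ j ∧ j < i ∧ j ≠ mi ∧ PySem.List.pyGetD nums j 0 = s) ∧
              (∀ j : Int, 0 ≤ j → j < i → j ≠ mi → PySem.List.pyGetD nums j 0 ≤ s)

-- the early-return check loop of A, characterised declaratively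
theorem aCheck_eq (nums : List Int) (mi : Int) (l : List Int) :
    aCheck nums mi l =
      if ∃ j ∈ l, j ≠ mi ∧ PySem.List.pyGetD nums mi 0 < 2 * PySem.List.pyGetD nums j 0
      then -1 else mi := by
  induction l with
  | nil => simp [aCheck]
  | cons i rest ih =>
    by_cases hi : i = mi
    · simp [aCheck, hi, ih]
    · by_cases hlt : PySem.List.pyGetD nums mi 0 < 2 * PySem.List.pyGetD nums i 0
      · simp [aCheck, hi, hlt]
      · simp [aCheck, hi, hlt, ih]

-- main invariant: B's single pass computes A's argmax, its value, and a faithful second maximum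
theorem altLoop_inv (nums : List Int) :
    ∀ (t : List Int) (i mv mi : Int) (sec : Option Int),
      0 ≤ i → i ≤ (nums.length : Int) → t = nums.drop i.toNat →
      0 ≤ mi → mi < i →
      PySem.List.pyGetD nums mi 0 = mv →
      (∀ j : Int, 0 ≤ j → j < i → PySem.List.pyGetD nums j 0 ≤ mv) →
      SecInv nums i mi sec →
      ((PySem.List.pyRange i (PySem.List.len nums) 1).foldl
          (fun m k => if PySem.List.pyGetD nums k 0 > PySem.List.pyGetD nums m 0 then k else m) mi
        = (altLoop t i mv mi sec).2.1) ∧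
      PySem.List.pyGetD nums (altLoop t i mv mi sec).2.1 0 = (altLoop t i mv mi sec).1 ∧
      SecInv nums (nums.length : Int) (altLoop t i mv mi sec).2.1 (altLoop t i mv mi sec).2.2 := by
  intro t
  induction t with
  | nil =>
    intro i mv mi sec h0i hin ht h0mi hmii hval hub hsec
    have hlen : nums.length ≤ i.toNat := by
      have := List.drop_eq_nil_iff.mp ht.symm
      omega
    have hieq : i = (nums.length : Int) := by omega
    subst hieq
    simp only [altLoop]
    refine ⟨?_, hval, hsec⟩
    rw [PySem.List.pyRange_one_eq_nil (by simp)]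
    rfl
  | cons x t' ih =>
    intro i mv mi sec h0i hin ht h0mi hmii hval hub hsec
    have hdrop : nums.drop i.toNat = x :: t' := ht.symm
    have hi_lt : i.toNat < nums.length := by
      by_contra h
      rw [List.drop_eq_nil_iff.mpr (by omega)] at hdrop
      simp at hdrop
    have hiInt : i < (nums.length : Int) := by omega
    have hx : PySem.List.pyGetD nums i 0 = x := by
      have h2 := List.getElem?_drop (xs := nums) (i := i.toNat) (j := 0)
      simp [hdrop] at h2
      have hcast : i = ((i.toNat : Nat) : Int) := by omega
      rw [hcast, PySem.List.pyGetD_natCast]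
      simp [List.getD, h2.symm]
    have hdrop' : t' = nums.drop (i + 1).toNat := by
      have h2 : (i + 1).toNat = i.toNat + 1 := by omega
      rw [h2, ← List.drop_drop]
      simp [hdrop]
    have hrange : PySem.List.pyRange i (PySem.List.len nums) 1
        = i :: PySem.List.pyRange (i + 1) (PySem.List.len nums) 1 := by
      apply PySem.List.pyRange_one_cons
      simpa using hiInt
    by_cases hgt : x > mv
    · -- new maximum at index i
      have hstep : altLoop (x :: t') i mv mi sec = altLoop t' (i + 1) x i (some mv) := by
        simp [altLoop, hgt]
      rw [hstep]
      have := ih (i + 1) x i (some mv) (by omega) (by omega) hdrop' h0i (by omega) hx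
        (fun j h0j hji => by
          by_cases hj : j = i
          · subst hj; rw [hx]
          · have := hub j h0j (by omega); omega)
        (by
          refine ⟨⟨mi, h0mi, by omega, by omega, hval⟩, ?_⟩
          intro j h0j hji hne
          exact hub j h0j (by omega))
      rw [hrange]
      simpa [hval, hx, hgt] using this
    · -- maximum unchanged; x is a candidate for 'second'
      have hfold : (fun m k => if PySem.List.pyGetD nums k 0 > PySem.List.pyGetD nums m 0 then k else m) mi i = mi := by
        simp [hx, hval, hgt]
      match sec with
      | none =>
        have hstep : altLoop (x :: t') i mv mi none = altLoop t' (i + 1) mv mi (some x) := by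
          simp [altLoop, hgt]
        rw [hstep]
        have := ih (i + 1) mv mi (some x) (by omega) (by omega) hdrop' h0mi (by omega) hval
          (fun j h0j hji => by
            by_cases hj : j = i
            · subst hj; rw [hx]; omega
            · exact hub j h0j (by omega))
          (by
            refine ⟨⟨i, h0i, by omega, by omega, hx⟩, ?_⟩
            intro j h0j hji hne
            by_cases hj : j = i
            · subst hj; rw [hx]
            · exact absurd (hsec j h0j (by omega)) hne)
        rw [hrange]
        simpa [hfold] using this
      | some s =>
        have hs_le_mv : s ≤ mv := by
          obtain ⟨⟨j0, h0, h1, h2, h3⟩, _⟩ := hsec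
          rw [← h3]; exact hub j0 h0 h1
        by_cases hxs : x > s
        · have hstep : altLoop (x :: t') i mv mi (some s) = altLoop t' (i + 1) mv mi (some x) := by
            simp [altLoop, hgt, hxs]
          rw [hstep]
          have := ih (i + 1) mv mi (some x) (by omega) (by omega) hdrop' h0mi (by omega) hval
            (fun j h0j hji => by
              by_cases hj : j = i
              · subst hj; rw [hx]; omega
              · exact hub j h0j (by omega))
            (by
              refine ⟨⟨i, h0i, by omega, by omega, hx⟩, ?_⟩
              intro j h0j hji hne
              by_cases hj : j = i
              · subst hj; rw [hx]
              · have := hsec.2 j h0j (by omega) hne; omega)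
          rw [hrange]
          simpa [hfold] using this
        · have hstep : altLoop (x :: t') i mv mi (some s) = altLoop t' (i + 1) mv mi (some s) := by
            simp [altLoop, hgt, hxs]
          rw [hstep]
          have := ih (i + 1) mv mi (some s) (by omega) (by omega) hdrop' h0mi (by omega) hval
            (fun j h0j hji => by
              by_cases hj : j = i
              · subst hj; rw [hx]; omega
              · exact hub j h0j (by omega))
            (by
              obtain ⟨⟨j0, h0, h1, h2, h3⟩, hbd⟩ := hsec
              refine ⟨⟨j0, h0, by omega, h2, h3⟩, ?_⟩
              intro j h0j hji hne
              by_cases hj : j = i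
              · subst hj; rw [hx]; omega
              · exact hbd j h0j (by omega) hne)
          rw [hrange]
          simpa [hfold] using this

-- ===== VERDICT (by name: the statement is the Claim_ definition above) =====
theorem dominantIndex_spec : Claim_equal_dominantIndex := by
  intro nums _
  unfold Spec_dominantIndex
  match nums with
  | [] => rfl
  | x :: rest =>
    have hinv := altLoop_inv (x :: rest) rest 1 x 0 none
      (by omega) (by simp) (by simp) (by omega) (by omega)
      (by simp [PySem.List.pyGetD_zero_cons])
      (fun j h0j hj1 => by
        have : j = 0 := by omega
        subst this
        simp [PySem.List.pyGetD_zero_cons])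
      (fun j h0j hj1 => by omega)
    obtain ⟨hfold, hval, hsec⟩ := hinv
    rcases hr : altLoop rest 1 x 0 none with ⟨mv, mi, sec⟩
    rw [hr] at hfold hval hsec
    have hA : dominantIndex (x :: rest) =
        if ∃ j ∈ PySem.List.pyRange 0 (PySem.List.len (x :: rest)) 1,
            j ≠ mi ∧ PySem.List.pyGetD (x :: rest) mi 0 < 2 * PySem.List.pyGetD (x :: rest) j 0
        then -1 else mi := by
      rw [dominantIndex]
      have hm : aMaxLoop (x :: rest) = mi := by
        rw [aMaxLoop]
        simpa using hfold
      rw [hm, aCheck_eq]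
    rw [hA, dominantIndex_alt, hr]
    match sec with
    | none =>
      simp only []
      rw [if_neg]
      rintro ⟨j, hjmem, hjne, _⟩
      rw [PySem.List.mem_pyRange_one] at hjmem
      exact hjne (hsec j hjmem.1 (by simpa using hjmem.2))
    | some s =>
      obtain ⟨⟨j0, hj00, hj0n, hj0ne, hj0val⟩, hbd⟩ := hsec
      simp only []
      by_cases hcase : mv < 2 * s
      · rw [if_pos, if_neg (by omega)]
        exact ⟨j0, by rw [PySem.List.mem_pyRange_one]; exact ⟨hj00, by simpa using hj0n⟩,
               hj0ne, by rw [hval, hj0val]; omega⟩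
      · rw [if_neg, if_pos (by omega)]
        rintro ⟨j, hjmem, hjne, hjlt⟩
        rw [PySem.List.mem_pyRange_one] at hjmem
        have := hbd j hjmem.1 (by simpa using hjmem.2) hjne
        rw [hval] at hjlt
        omega
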